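-- pv_equiv track=rewrite | github.com/LightspeedDMS/code-indexer | src/code_indexer/server/services/remote_branch_service.py | extract_branch_names_from_ls_remote
-- ===== SOURCE A (Python) =====
-- from typing import Dict, List, Optional
--
-- def extract_branch_names_from_ls_remote(ls_remote_output: str) -> List[str]:
--     """
--     Extract branch names from git ls-remote output.
--
--     The git ls-remote --heads output format is:
--     <commit_hash>\t<ref_name>
--
--     Where ref_name is like: refs/heads/main, refs/heads/feature/login
--
--     Args:
--         ls_remote_output: Raw output from git ls-remote --heads
--
--     Returns:
--         List of branch names (without refs/heads/ prefix)
--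
--     Example:
--         Input: "abc123\trefs/heads/main\ndef456\trefs/heads/develop"
--         Output: ["main", "develop"]
--     """
--     if not ls_remote_output or not ls_remote_output.strip():
--         return []
--
--     branches = []
--     for line in ls_remote_output.strip().split("\n"):
--         line = line.strip()
--         if not line:
--             continue
--
--         # Format: <hash>\t<ref>
--         parts = line.split("\t")
--         if len(parts) >= 2:
--             ref = parts[1]
--             # Only process refs/heads/ (branches), not refs/tags/
--             if ref.startswith("refs/heads/"):
--                 branch_name = ref[len("refs/heads/") :]
--                 branches.append(branch_name)
--
--     return branches
-- ===== SOURCE B (Python) =====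
-- import re
--
-- # One anchored regex does the per-line parsing: first tab-separated field, a tab,
-- # the refs/heads/ prefix, then the branch name up to the next tab (or end of line).
-- _HEADS = re.compile(r"[^\t]*\trefs/heads/([^\t]*)")
--
--
-- def extract_branch_names_from_ls_remote(ls_remote_output: str):
--     return [m.group(1)
--             for line in ls_remote_output.strip().split("\n")
--             if (m := _HEADS.match(line.strip()))]
-- ===== Notes on version B (the rewrite author's own statement) =====
-- stated objective: idiomatic
-- what changed: B replaces A's tab-splitting, field-count test and prefix slicing by a single compiled regex matched against each stripped line, collecting the captured branch names in a comprehension.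
import Mathlib
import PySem

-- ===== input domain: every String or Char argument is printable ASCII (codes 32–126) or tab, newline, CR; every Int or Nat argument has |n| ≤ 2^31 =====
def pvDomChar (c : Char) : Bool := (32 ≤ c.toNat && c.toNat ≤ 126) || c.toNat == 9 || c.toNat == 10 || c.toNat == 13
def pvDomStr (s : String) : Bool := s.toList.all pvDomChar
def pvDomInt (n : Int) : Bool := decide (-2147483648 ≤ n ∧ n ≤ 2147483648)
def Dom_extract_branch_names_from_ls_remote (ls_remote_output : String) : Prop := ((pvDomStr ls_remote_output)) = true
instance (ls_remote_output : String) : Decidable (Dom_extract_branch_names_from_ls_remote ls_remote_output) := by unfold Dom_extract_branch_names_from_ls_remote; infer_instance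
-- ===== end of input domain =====

-- B parses each stripped line with one compiled regex instead of A's tab-split, field-count
-- test and prefix slicing (objective: idiomatic).

-- ===== PORT A =====
-- loop body of A: strip the line, split on tabs, keep parts[1] when it starts with "refs/heads/"
def pvStepA (branches : List String) (line : List Char) : List String :=
  let l := PySem.Chars.strip line
  if l = [] then branches
  else
    let parts := PySem.Chars.splitOn l ['\t']
    if 2 ≤ parts.length then
      let ref := parts.getD 1 []
      if PySem.Chars.startswith ref "refs/heads/".toList then
        -- branch_name = ref[len("refs/heads/"):]
        branches ++ [String.ofList (PySem.Chars.slice ref (some (11 : Int)) none)]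
      else branches
    else branches

def extract_branch_names_from_ls_remote (ls_remote_output : String) : List String :=
  -- if not ls_remote_output or not ls_remote_output.strip(): return []
  if ls_remote_output.toList = [] ∨ PySem.Chars.strip ls_remote_output.toList = [] then []
  else
    (PySem.Chars.splitOn (PySem.Chars.strip ls_remote_output.toList) ['\n']).foldl pvStepA []

-- ===== PORT B =====
-- Hand port of re.match(r"[^\t]*\trefs/heads/([^\t]*)", line.strip()): this regex is
-- deterministic — the greedy [^\t]* cannot contain a tab and the following literal '\t' forces
-- it to stop exactly at the first tab, so match = drop the (maximal) tab-free prefix, consume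
-- the tab, require the literal "refs/heads/", capture greedily up to the next tab — step for
-- step the port below; exact, since no character class involved can cross a tab.
def pvMatchLine (line : List Char) : Option (List Char) :=
  match (PySem.Chars.strip line).dropWhile (fun c => c != '\t') with
  | [] => none
  | _ :: r =>
    if "refs/heads/".toList.isPrefixOf r then
      some ((r.drop 11).takeWhile (fun c => c != '\t'))
    else none

def extract_branch_names_from_ls_remote_alt (ls_remote_output : String) : List String :=
  ((PySem.Chars.splitOn (PySem.Chars.strip ls_remote_output.toList) ['\n']).filterMap
      pvMatchLine).map (fun cs => String.ofList cs)

-- ===== PRECONDITION & SPEC =====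
def Spec_extract_branch_names_from_ls_remote (ls_remote_output : String) (out : List String) : Prop := out = extract_branch_names_from_ls_remote_alt ls_remote_output
instance (ls_remote_output : String) (out : List String) : Decidable (Spec_extract_branch_names_from_ls_remote ls_remote_output out) := by unfold Spec_extract_branch_names_from_ls_remote; infer_instance

-- ===== CLAIM (what is proved, stated in full; the proofs are below) =====
def Claim_equal_extract_branch_names_from_ls_remote : Prop := ∀ (ls_remote_output : String), Dom_extract_branch_names_from_ls_remote ls_remote_output → Spec_extract_branch_names_from_ls_remote ls_remote_output (extract_branch_names_from_ls_remote ls_remote_output)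

-- ===== LEMMAS AND PROOFS =====

-- a simple structural form of PySem.Chars.splitOn for a one-character separator
def pvSplitC (c : Char) (l : List Char) : List (List Char) :=
  match hdw : l.dropWhile (fun x => x != c) with
  | [] => [l.takeWhile (fun x => x != c)]
  | _ :: rest => l.takeWhile (fun x => x != c) :: pvSplitC c rest
termination_by l.length
decreasing_by
  have hs := (List.dropWhile_sublist (l := l) (fun x => x != c)).length_le
  rw [hdw] at hs; simp at hs; omega

def pvModHead (x : List Char) : List (List Char) → List (List Char)
  | [] => [x]
  | h :: t => (x ++ h) :: t

theorem pvSplitC_eq_nil {c : Char} {l : List Char}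
    (h : l.dropWhile (fun x => x != c) = []) :
    pvSplitC c l = [l.takeWhile (fun x => x != c)] := by
  rw [pvSplitC]
  split <;> rename_i heq
  · rfl
  · rw [h] at heq; cases heq

theorem pvSplitC_eq_cons {c a : Char} {l rest : List Char}
    (h : l.dropWhile (fun x => x != c) = a :: rest) :
    pvSplitC c l = l.takeWhile (fun x => x != c) :: pvSplitC c rest := by
  rw [pvSplitC]
  split <;> rename_i heq
  · rw [h] at heq; cases heq
  · rw [h] at heq
    obtain ⟨rfl, rfl⟩ := List.cons.inj heq
    rfl

theorem pvSplitC_shape (c : Char) (l : List Char) :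
    ∃ tl, pvSplitC c l = l.takeWhile (fun x => x != c) :: tl := by
  rw [pvSplitC]
  cases h : l.dropWhile (fun x => x != c) with
  | nil => exact ⟨[], rfl⟩
  | cons a rest => exact ⟨pvSplitC c rest, rfl⟩

theorem pvGo_eq (c : Char) (fuel : Nat) (l cur : List Char) (acc : List (List Char))
    (hf : l.length < fuel) :
    PySem.Chars.splitOn.go [c] fuel l cur acc = acc.reverse ++ pvModHead cur.reverse (pvSplitC c l) := by
  induction fuel generalizing l cur acc with
  | zero => omega
  | succ n ih =>
    cases l with
    | nil =>
      rw [PySem.Chars.splitOn.go.eq_def,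
        show pvSplitC c [] = [[]] from by rw [pvSplitC]; rfl]
      simp [pvModHead]
    | cons ch rest =>
      rw [PySem.Chars.splitOn.go.eq_def]
      simp only [List.isPrefixOf, Bool.and_true, List.length_cons] at *
      by_cases hc : c = ch
      · subst hc
        simp only [beq_self_eq_true, if_true, List.drop_succ_cons, List.length_nil,
          List.drop_zero]
        rw [ih rest [] (cur.reverse :: acc) (by simpa using hf)]
        obtain ⟨tl, hs⟩ := pvSplitC_shape c rest
        have h2 : pvSplitC c (c :: rest) = [] :: pvSplitC c rest := by
          rw [pvSplitC_eq_cons (List.dropWhile_cons_of_neg (by simp))]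
          simp
        rw [h2, hs]
        simp [pvModHead]
      · have hbe : (c == ch) = false := by simp [hc]
        simp only [hbe]
        rw [ih rest (ch :: cur) acc (by omega)]
        have hpred : ((fun x => x != c) ch) = true := by simp [Ne.symm hc]
        have ht : List.takeWhile (fun x => x != c) (ch :: rest)
            = ch :: List.takeWhile (fun x => x != c) rest :=
          List.takeWhile_cons_of_pos hpred
        have h2 : pvSplitC c (ch :: rest) =
            pvModHead [ch] (pvSplitC c rest) := by
          cases heq : List.dropWhile (fun x => x != c) rest with
          | nil =>
            rw [pvSplitC_eq_nil (by
                rw [List.dropWhile_cons_of_pos (p := fun x => x != c) (a := ch) (l := rest) hpred]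
                exact heq),
              pvSplitC_eq_nil heq, ht]
            simp [pvModHead]
          | cons a r =>
            rw [pvSplitC_eq_cons (by
                rw [List.dropWhile_cons_of_pos (p := fun x => x != c) (a := ch) (l := rest) hpred]
                exact heq),
              pvSplitC_eq_cons heq, ht]
            simp [pvModHead]
        rw [h2]
        obtain ⟨tl, hs⟩ := pvSplitC_shape c rest
        rw [hs]
        simp [pvModHead]

theorem pvSplitOn_eq (c : Char) (l : List Char) :
    PySem.Chars.splitOn l [c] = pvSplitC c l := by
  unfold PySem.Chars.splitOn
  rw [pvGo_eq c (l.length + 1) l [] [] (by omega)]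
  obtain ⟨tl, hs⟩ := pvSplitC_shape c l
  rw [hs]
  simp [pvModHead]

theorem pvDropWhile_eq_cons {p : Char → Bool} {l r : List Char} {x : Char}
    (h : l.dropWhile p = x :: r) : p x = false := by
  induction l with
  | nil => simp at h
  | cons a l ih =>
    by_cases ha : p a
    · rw [List.dropWhile_cons_of_pos ha] at h; exact ih h
    · rw [List.dropWhile_cons_of_neg ha] at h
      cases h; simpa using ha

theorem pvTakeWhile_append_all {p : Char → Bool} {a : List Char} (b : List Char)
    (h : ∀ x ∈ a, p x = true) : (a ++ b).takeWhile p = a ++ b.takeWhile p := by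
  induction a with
  | nil => rfl
  | cons x a ih =>
    rw [List.cons_append, List.takeWhile_cons_of_pos (h x (by simp)),
      ih fun y hy => h y (by simp [hy])]
    simp

theorem pvPat_notab : ∀ c ∈ "refs/heads/".toList, (c != '\t') = true := by
  have h : "refs/heads/".toList.all (fun c => c != '\t') = true := by decide
  exact List.all_eq_true.mp h

-- the per-line contribution of A's loop body, as an Option
def pvAOpt (t : List Char) : Option String :=
  if t = [] then none
  else if 2 ≤ (pvSplitC '\t' t).length then
    if PySem.Chars.startswith ((pvSplitC '\t' t).getD 1 []) "refs/heads/".toList then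
      some (String.ofList (PySem.Chars.slice ((pvSplitC '\t' t).getD 1 []) (some (11 : Int)) none))
    else none
  else none

theorem pvStepA_unfold (br : List String) (line : List Char) :
    pvStepA br line =
      if PySem.Chars.strip line = [] then br
      else if 2 ≤ (PySem.Chars.splitOn (PySem.Chars.strip line) ['\t']).length then
        if PySem.Chars.startswith
            ((PySem.Chars.splitOn (PySem.Chars.strip line) ['\t']).getD 1 []) "refs/heads/".toList
        then br ++ [String.ofList (PySem.Chars.slice
          ((PySem.Chars.splitOn (PySem.Chars.strip line) ['\t']).getD 1 []) (some (11 : Int)) none)]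
        else br
      else br := rfl

theorem pvStepA_eq (br : List String) (line : List Char) :
    pvStepA br line = br ++ (pvAOpt (PySem.Chars.strip line)).toList := by
  rw [pvStepA_unfold, pvAOpt, pvSplitOn_eq]
  split_ifs <;> simp

-- the heart of the equivalence: on each line, A's field logic and B's regex matcher agree
theorem pvOpt_eq (line : List Char) :
    pvAOpt (PySem.Chars.strip line) = (pvMatchLine line).map (fun cs => String.ofList cs) := by
  rw [pvMatchLine]
  set t := PySem.Chars.strip line with ht
  cases hd : t.dropWhile (fun c => c != '\t') with
  | nil =>
    by_cases h0 : t = []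
    · rw [pvAOpt, if_pos h0]; rfl
    · rw [pvAOpt, if_neg h0, pvSplitC_eq_nil hd]
      simp
  | cons d q =>
    have hdt : d = '\t' := by simpa using pvDropWhile_eq_cons hd
    subst hdt
    have h0 : t ≠ [] := by intro h; rw [h] at hd; simp at hd
    obtain ⟨tl, hsq⟩ := pvSplitC_shape '\t' q
    have hparts : pvSplitC '\t' t
        = t.takeWhile (fun x => x != '\t') :: q.takeWhile (fun x => x != '\t') :: tl := by
      rw [pvSplitC_eq_cons hd, hsq]
    rw [pvAOpt, if_neg h0, hparts]
    simp only [List.length_cons, Nat.le_add_left, if_true, List.getD, List.getElem?_cons_succ,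
      List.getElem?_cons_zero, Option.getD_some]
    by_cases hpre : "refs/heads/".toList <+: q
    · obtain ⟨u, rfl⟩ := hpre
      have htk : (("refs/heads/".toList ++ u).takeWhile (fun x => x != '\t'))
          = "refs/heads/".toList ++ u.takeWhile (fun x => x != '\t') :=
        pvTakeWhile_append_all u pvPat_notab
      have hsw : PySem.Chars.startswith (("refs/heads/".toList ++ u).takeWhile (fun x => x != '\t'))
          "refs/heads/".toList = true := by
        rw [PySem.Chars.startswith_iff, htk]
        exact ⟨u.takeWhile (fun x => x != '\t'), rfl⟩
      rw [if_pos hsw, if_pos (List.isPrefixOf_iff_prefix.mpr ⟨u, rfl⟩)]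
      have hslice : PySem.Chars.slice (("refs/heads/".toList ++ u).takeWhile (fun x => x != '\t'))
          (some (11 : Int)) none = u.takeWhile (fun x => x != '\t') := by
        rw [PySem.Chars.slice_eq_listSlice, PySem.List.slice_from _ (by norm_num), htk,
          show ((11 : Int)).toNat = "refs/heads/".toList.length from by decide,
          List.drop_left]
      have hdrop : ("refs/heads/".toList ++ u).drop 11 = u := by
        rw [show (11 : Nat) = "refs/heads/".toList.length from by decide, List.drop_left]
      rw [hslice, hdrop]
      rfl
    · rw [if_neg (by
          rw [PySem.Chars.startswith_iff]
          intro h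
          exact hpre (h.trans (List.takeWhile_prefix _))),
        if_neg (by
          rw [Bool.not_eq_true, Bool.eq_false_iff]
          intro h
          exact hpre (List.isPrefixOf_iff_prefix.mp h))]
      rfl

theorem pvFold_eq (lines : List (List Char)) (br : List String) :
    lines.foldl pvStepA br
      = br ++ (lines.filterMap pvMatchLine).map (fun cs => String.ofList cs) := by
  induction lines generalizing br with
  | nil => simp
  | cons l ls ih =>
    simp only [List.foldl_cons, List.filterMap_cons]
    rw [pvStepA_eq br l, pvOpt_eq l, ih]
    cases h : pvMatchLine l <;> simp

-- ===== VERDICT (by name: the statement is the Claim_ definition above) =====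
theorem extract_branch_names_from_ls_remote_spec : Claim_equal_extract_branch_names_from_ls_remote := by
  intro s _
  unfold Spec_extract_branch_names_from_ls_remote
  unfold extract_branch_names_from_ls_remote extract_branch_names_from_ls_remote_alt
  by_cases h0 : PySem.Chars.strip s.toList = []
  · rw [if_pos (Or.inr h0), h0, pvSplitOn_eq,
      show pvSplitC '\n' [] = [[]] from by rw [pvSplitC]; rfl]
    rfl
  · rw [if_neg (by
      rintro (h | h)
      · exact h0 (by rw [h]; rfl)
      · exact h0 h)]
    rw [pvFold_eq _ []]
    simp
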